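-- pv_equiv track=rewrite | github.com/fabionr15-dot/scripe-standalone | backend/src/app/signals/tech_detector.py | get_tech_score
-- ===== SOURCE A (Python) =====
-- TECH_CATEGORIES = {
--     "ecommerce": ["shopify", "woocommerce", "magento", "prestashop"],
--     "cms": ["wordpress", "drupal", "joomla"],
--     "analytics": ["google_analytics", "hotjar", "mixpanel"],
--     "marketing": ["hubspot", "mailchimp", "intercom", "drift"],
--     "framework": ["react", "vue", "angular", "next_js"],
--     "infrastructure": ["cloudflare", "aws"],
--     "payments": ["stripe", "paypal"],
-- }
--
-- def get_tech_score(technologies: list[str]) -> int: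
--     """Calculate a tech sophistication score.
--
--     Args:
--         technologies: List of detected technologies
--
--     Returns:
--         Score from 0-100
--     """
--     score = 0
--
--     # Base score for having any tech
--     if technologies:
--         score += 20
--
--     # Points for different categories
--     for tech in technologies:
--         if tech in TECH_CATEGORIES.get("ecommerce", []):
--             score += 15
--         elif tech in TECH_CATEGORIES.get("marketing", []):
--             score += 10
--         elif tech in TECH_CATEGORIES.get("analytics", []):
--             score += 5
--         elif tech in TECH_CATEGORIES.get("framework", []):
--             score += 10
--         elif tech in TECH_CATEGORIES.get("payments", []):
--             score += 15
--
--     return min(score, 100)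
-- ===== SOURCE B (Python) =====
-- TIER15 = frozenset(["shopify", "woocommerce", "magento", "prestashop", "stripe", "paypal"])
-- TIER10 = frozenset(["hubspot", "mailchimp", "intercom", "drift", "react", "vue", "angular", "next_js"])
-- TIER5 = frozenset(["google_analytics", "hotjar", "mixpanel"])
--
-- def get_tech_score(technologies: list[str]) -> int:
--     if not technologies:
--         return 0
--     n15 = sum(1 for t in technologies if t in TIER15)
--     n10 = sum(1 for t in technologies if t in TIER10)
--     n5 = sum(1 for t in technologies if t in TIER5)
--     return min(20 + 15 * n15 + 10 * n10 + 5 * n5, 100)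
-- ===== Notes on version B (the rewrite author's own statement) =====
-- stated objective: alternative
-- what changed: Replaces A's single accumulator loop with its five-way elif list scan by three staged counting passes over disjoint frozenset point tiers combined arithmetically as 20 + 15*n15 + 10*n10 + 5*n5, capped at 100.
import Mathlib
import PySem

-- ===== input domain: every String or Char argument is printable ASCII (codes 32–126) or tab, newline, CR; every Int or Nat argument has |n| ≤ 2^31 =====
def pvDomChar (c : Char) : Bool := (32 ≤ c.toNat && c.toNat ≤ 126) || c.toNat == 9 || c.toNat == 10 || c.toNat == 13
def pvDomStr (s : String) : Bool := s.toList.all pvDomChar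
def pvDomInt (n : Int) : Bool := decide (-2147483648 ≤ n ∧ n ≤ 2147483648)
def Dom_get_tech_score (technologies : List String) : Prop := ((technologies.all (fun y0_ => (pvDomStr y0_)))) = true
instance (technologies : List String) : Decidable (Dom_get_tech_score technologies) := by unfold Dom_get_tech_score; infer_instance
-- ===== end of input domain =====

-- B replaces A's accumulator loop with the five-way elif scan by three staged tier-counting passes combined arithmetically (objective: alternative).

-- ===== PORT A =====
def TECH_CATEGORIES : PySem.Dict String (List String) :=
  PySem.Dict.ofList [
    ("ecommerce", ["shopify", "woocommerce", "magento", "prestashop"]),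
    ("cms", ["wordpress", "drupal", "joomla"]),
    ("analytics", ["google_analytics", "hotjar", "mixpanel"]),
    ("marketing", ["hubspot", "mailchimp", "intercom", "drift"]),
    ("framework", ["react", "vue", "angular", "next_js"]),
    ("infrastructure", ["cloudflare", "aws"]),
    ("payments", ["stripe", "paypal"])]

def get_tech_score (technologies : List String) : Int :=
  let score : Int := 0
  let score := if technologies ≠ [] then score + 20 else score
  let score := technologies.foldl (fun score tech =>
    if (TECH_CATEGORIES.getD "ecommerce" []).contains tech then score + 15
    else if (TECH_CATEGORIES.getD "marketing" []).contains tech then score + 10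
    else if (TECH_CATEGORIES.getD "analytics" []).contains tech then score + 5
    else if (TECH_CATEGORIES.getD "framework" []).contains tech then score + 10
    else if (TECH_CATEGORIES.getD "payments" []).contains tech then score + 15
    else score) score
  min score 100

-- ===== PORT B =====
def TIER15 : PySem.Set String :=
  PySem.Set.ofList ["shopify", "woocommerce", "magento", "prestashop", "stripe", "paypal"]
def TIER10 : PySem.Set String :=
  PySem.Set.ofList ["hubspot", "mailchimp", "intercom", "drift", "react", "vue", "angular", "next_js"]
def TIER5 : PySem.Set String :=
  PySem.Set.ofList ["google_analytics", "hotjar", "mixpanel"]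

def get_tech_score_alt (technologies : List String) : Int :=
  if technologies = [] then 0
  else
    let n15 : Int := (technologies.countP (fun t => PySem.Set.contains TIER15 t) : Int)
    let n10 : Int := (technologies.countP (fun t => PySem.Set.contains TIER10 t) : Int)
    let n5 : Int := (technologies.countP (fun t => PySem.Set.contains TIER5 t) : Int)
    min (20 + 15 * n15 + 10 * n10 + 5 * n5) 100

-- ===== PRECONDITION & SPEC =====
def Spec_get_tech_score (technologies : List String) (out : Int) : Prop := out = get_tech_score_alt technologies
instance (technologies : List String) (out : Int) : Decidable (Spec_get_tech_score technologies out) := by unfold Spec_get_tech_score; infer_instance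

-- ===== CLAIM =====
def Claim_equal_get_tech_score : Prop := ∀ (technologies : List String), Dom_get_tech_score technologies → Spec_get_tech_score technologies (get_tech_score technologies)

-- ===== LEMMAS AND PROOFS =====

-- A's per-element elif chain awards exactly 15/10/5 per membership in the disjoint tiers.
theorem step_eq (t : String) :
    (if (TECH_CATEGORIES.getD "ecommerce" []).contains t then (15 : Int)
     else if (TECH_CATEGORIES.getD "marketing" []).contains t then 10
     else if (TECH_CATEGORIES.getD "analytics" []).contains t then 5
     else if (TECH_CATEGORIES.getD "framework" []).contains t then 10
     else if (TECH_CATEGORIES.getD "payments" []).contains t then 15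
     else 0)
    = 15 * (if PySem.Set.contains TIER15 t then (1 : Int) else 0)
      + 10 * (if PySem.Set.contains TIER10 t then (1 : Int) else 0)
      + 5 * (if PySem.Set.contains TIER5 t then (1 : Int) else 0) := by
  by_cases h1 : t = "shopify"
  · subst h1; decide
  by_cases h2 : t = "woocommerce"
  · subst h2; decide
  by_cases h3 : t = "magento"
  · subst h3; decide
  by_cases h4 : t = "prestashop"
  · subst h4; decide
  by_cases h5 : t = "stripe"
  · subst h5; decide
  by_cases h6 : t = "paypal"
  · subst h6; decide
  by_cases h7 : t = "hubspot"
  · subst h7; decide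
  by_cases h8 : t = "mailchimp"
  · subst h8; decide
  by_cases h9 : t = "intercom"
  · subst h9; decide
  by_cases h10 : t = "drift"
  · subst h10; decide
  by_cases h11 : t = "react"
  · subst h11; decide
  by_cases h12 : t = "vue"
  · subst h12; decide
  by_cases h13 : t = "angular"
  · subst h13; decide
  by_cases h14 : t = "next_js"
  · subst h14; decide
  by_cases h15 : t = "google_analytics"
  · subst h15; decide
  by_cases h16 : t = "hotjar"
  · subst h16; decide
  by_cases h17 : t = "mixpanel"
  · subst h17; decide
  have e1 : TECH_CATEGORIES.getD "ecommerce" [] = ["shopify", "woocommerce", "magento", "prestashop"] := rfl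
  have e2 : TECH_CATEGORIES.getD "marketing" [] = ["hubspot", "mailchimp", "intercom", "drift"] := rfl
  have e3 : TECH_CATEGORIES.getD "analytics" [] = ["google_analytics", "hotjar", "mixpanel"] := rfl
  have e4 : TECH_CATEGORIES.getD "framework" [] = ["react", "vue", "angular", "next_js"] := rfl
  have e5 : TECH_CATEGORIES.getD "payments" [] = ["stripe", "paypal"] := rfl
  rw [e1, e2, e3, e4, e5]
  simp [TIER15, TIER10, TIER5, PySem.Set.ofList, PySem.Set.contains,
    h1, h2, h3, h4, h5, h6, h7, h8, h9, h10, h11, h12, h13, h14, h15, h16, h17]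

-- A's whole loop equals the staged tier counts combined arithmetically.
theorem foldl_counts (xs : List String) (init : Int) :
    xs.foldl (fun score tech =>
      if (TECH_CATEGORIES.getD "ecommerce" []).contains tech then score + 15
      else if (TECH_CATEGORIES.getD "marketing" []).contains tech then score + 10
      else if (TECH_CATEGORIES.getD "analytics" []).contains tech then score + 5
      else if (TECH_CATEGORIES.getD "framework" []).contains tech then score + 10
      else if (TECH_CATEGORIES.getD "payments" []).contains tech then score + 15
      else score) init
    = init + 15 * (xs.countP (fun t => PySem.Set.contains TIER15 t) : Int)
           + 10 * (xs.countP (fun t => PySem.Set.contains TIER10 t) : Int)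
           + 5 * (xs.countP (fun t => PySem.Set.contains TIER5 t) : Int) := by
  induction xs generalizing init with
  | nil => simp
  | cons h tl ih =>
    simp only [List.foldl_cons, List.countP_cons, ih]
    have := step_eq h
    split_ifs at this ⊢ <;> push_cast <;> omega

-- ===== VERDICT =====
theorem get_tech_score_spec : Claim_equal_get_tech_score := by
  intro xs _
  unfold Spec_get_tech_score get_tech_score get_tech_score_alt
  rcases xs with _ | ⟨h, tl⟩
  · simp
  · simp only [foldl_counts]
    simp
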